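-- pv_equiv track=rewrite | github.com/sircinnamon/AoC2024 | 21/pt1.py | next_layer
-- ===== SOURCE A (Python) =====
-- def next_layer(path, paths):
-- 	nl = [""]
-- 	prev = "A"
-- 	for p in path:
-- 		opts = paths[(prev, p)]
-- 		new = []
-- 		if(len(opts) == 1):
-- 			for i,v in enumerate(nl):
-- 				nl[i] = v+opts[0]
-- 		else:
-- 			for i,v in enumerate(nl):
-- 				nl[i] = v+opts[0]
-- 				new.append(v+opts[1])
-- 			nl = nl + new
-- 		prev = p
-- 	# print (nl)
-- 	return nl
-- ===== SOURCE B (Python) =====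
-- def next_layer(path, paths):
--     # Pass 1: collect the (at most two used) options for each transition.
--     prev = "A"
--     opts_list = []
--     for p in path:
--         opts_list.append(paths[(prev, p)][:2])
--         prev = p
--     # Pass 2: build the combinations back-to-front (suffix product),
--     # so the earliest transition varies fastest.
--     combos = [""]
--     for opts in reversed(opts_list):
--         combos = [o + s for s in combos for o in opts]
--     return combos
-- ===== Notes on version B (the rewrite author's own statement) =====
-- stated objective: alternative
-- what changed: A interleaves key lookup with in-place list doubling (separate branches for 1 vs 2 options); B first collects the per-transition option lists in one pass, then builds the combinations back-to-front as a single suffix product with one uniform comprehension step.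
import Mathlib
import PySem

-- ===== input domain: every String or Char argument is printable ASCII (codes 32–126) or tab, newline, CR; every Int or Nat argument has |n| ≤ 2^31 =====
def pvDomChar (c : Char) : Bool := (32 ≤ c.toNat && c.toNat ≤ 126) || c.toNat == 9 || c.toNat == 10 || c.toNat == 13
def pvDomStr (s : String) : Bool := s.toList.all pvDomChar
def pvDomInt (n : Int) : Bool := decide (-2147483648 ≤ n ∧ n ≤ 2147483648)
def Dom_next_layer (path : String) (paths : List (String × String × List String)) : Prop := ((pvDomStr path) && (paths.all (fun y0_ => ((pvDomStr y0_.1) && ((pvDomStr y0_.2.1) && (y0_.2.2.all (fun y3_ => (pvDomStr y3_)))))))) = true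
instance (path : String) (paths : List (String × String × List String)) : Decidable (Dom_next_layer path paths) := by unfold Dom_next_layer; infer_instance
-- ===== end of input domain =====

-- B replaces A's in-place list-doubling (with a length-1 special case) by two plain passes:
-- collect the per-transition option lists, then build the combinations back-to-front as a
-- suffix product; objective: alternative (same cost, no special-casing, clearer structure).
-- Both programs only READ their arguments; no mutation is observable by the caller.

-- shared helper: Python dict lookup paths[(a, b)] (assoc list, first match)
def lookupPaths (paths : List (String × String × List String)) (a b : String) : Option (List String) :=
  match paths with
  | [] => none
  | (k1, k2, v) :: rest => if k1 = a ∧ k2 = b then some v else lookupPaths rest a b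

-- ===== PORT A =====
-- literal transliteration of A's loop: state (nl, prev); `opts[0]`/`opts[1]` via pyGet?
-- (the `.getD` defaults are never reached inside Pre_next_layer, which excludes the
-- KeyError/IndexError inputs where the Python raises)
def next_layer (path : String) (paths : List (String × String × List String)) : List String :=
  (path.toList.foldl
    (fun (st : List String × String) (c : Char) =>
      let p := String.ofList [c]
      let opts := (lookupPaths paths st.2 p).getD []
      let o0 := (PySem.List.pyGet? opts 0).getD ""
      if opts.length = 1 then
        (st.1.map (fun v => v ++ o0), p)
      else
        -- nl[i] = v + opts[0] for all i, then nl = nl + [v + opts[1] for v]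
        let o1 := (PySem.List.pyGet? opts 1).getD ""
        (st.1.map (fun v => v ++ o0) ++ st.1.map (fun v => v ++ o1), p))
    ([""], "A")).1

-- ===== PORT B =====
-- pass 1 of Source B: opts_list.append(paths[(prev, p)][:2]) walking prev through path
def collectOpts (paths : List (String × String × List String)) : String → List Char → List (List String)
  | _, [] => []
  | prev, c :: cs =>
    let p := String.ofList [c]
    ((lookupPaths paths prev p).getD []).take 2 :: collectOpts paths p cs

-- pass 2 of Source B: combos = [o + s for s in combos for o in opts] over reversed(opts_list)
def next_layer_alt (path : String) (paths : List (String × String × List String)) : List String :=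
  (collectOpts paths "A" path.toList).reverse.foldl
    (fun combos opts => combos.flatMap (fun s => opts.map (fun o => o ++ s))) [""]

-- ===== PRECONDITION & SPEC =====
-- Pre_ excludes exactly the inputs where the Python A raises: a transition key
-- (prev, p) missing from paths (KeyError) or mapped to an empty option list
-- (IndexError on opts[0]).  The Nodup conjunct only states that paths is a real
-- Python dict (a dict cannot carry a duplicate key), so nothing A accepts is lost.
def Pre_next_layer (path : String) (paths : List (String × String × List String)) : Prop :=
  (paths.map (fun e => (e.1, e.2.1))).Nodup ∧
  ∀ pr ∈ List.zip ("A" :: path.toList.map (fun c => String.ofList [c]))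
                  (path.toList.map (fun c => String.ofList [c])),
    ∃ e ∈ paths, (e.1, e.2.1) = pr ∧ e.2.2 ≠ []
instance (path : String) (paths : List (String × String × List String)) : Decidable (Pre_next_layer path paths) := by unfold Pre_next_layer; infer_instance

def pvWitness_next_layer : String × (List (String × String × List String)) :=
  ("bc", [("A", "b", ["<^", "^<"]), ("b", "c", [">"])])

def Spec_next_layer (path : String) (paths : List (String × String × List String)) (out : List String) : Prop := out = next_layer_alt path paths
instance (path : String) (paths : List (String × String × List String)) (out : List String) : Decidable (Spec_next_layer path paths out) := by unfold Spec_next_layer; infer_instance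

-- ===== CLAIM (what is proved, stated in full; the proofs are below) =====
def Claim_equal_next_layer : Prop := ∀ (path : String) (paths : List (String × String × List String)), Dom_next_layer path paths → Pre_next_layer path paths → Spec_next_layer path paths (next_layer path paths)

-- ===== LEMMAS AND PROOFS =====

-- the common "one transition" step both sides reduce to
def stepT (nl : List String) (t : List String) : List String :=
  t.flatMap (fun o => nl.map (fun v => v ++ o))

-- B's fold result over a transition list
def prodB (ts : List (List String)) : List String :=
  ts.reverse.foldl (fun combos opts => combos.flatMap (fun s => opts.map (fun o => o ++ s))) [""]

lemma prodB_cons (t : List String) (ts : List (List String)) :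
    prodB (t :: ts) = (prodB ts).flatMap (fun s => t.map (fun o => o ++ s)) := by
  simp [prodB, List.reverse_cons, List.foldl_append]

-- B's port is prodB of the collected list
lemma alt_eq_prodB (path : String) (paths : List (String × String × List String)) :
    next_layer_alt path paths = prodB (collectOpts paths "A" path.toList) := rfl

-- core product lemma: a left fold of stepT equals suffix-product-then-prefix
lemma foldl_stepT (ts : List (List String)) (nl : List String) :
    ts.foldl stepT nl = (prodB ts).flatMap (fun s => nl.map (fun v => v ++ s)) := by
  induction ts generalizing nl with
  | nil => simp [prodB]
  | cons t ts ih =>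
      rw [List.foldl_cons, ih (stepT nl t), prodB_cons]
      simp only [stepT, List.flatMap_assoc, List.flatMap_map, List.map_flatMap, List.map_map]
      simp [Function.comp_def, String.append_assoc]

-- under the Pre_ hypothesis, one step of A equals stepT with the (take 2) options
lemma a_step_eq (nl : List String) (opts : List String) (h : opts ≠ []) :
    (if opts.length = 1 then
       nl.map (fun v => v ++ (PySem.List.pyGet? opts 0).getD "")
     else
       nl.map (fun v => v ++ (PySem.List.pyGet? opts 0).getD "") ++
       nl.map (fun v => v ++ (PySem.List.pyGet? opts 1).getD ""))
    = stepT nl (opts.take 2) := by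
  match opts with
  | [] => exact absurd rfl h
  | [a] => simp [stepT, PySem.List.pyGet?, PySem.List.pyIdx?]
  | a :: b :: rest =>
      have hlen : (a :: b :: rest).length ≠ 1 := by simp
      rw [if_neg hlen]
      simp [stepT, PySem.List.pyGet?_zero_cons]

-- with nodup keys, lookupPaths finds exactly the member entry
lemma lookup_of_mem_nodup (paths : List (String × String × List String))
    (hnd : (paths.map (fun e => (e.1, e.2.1))).Nodup) (e : String × String × List String)
    (he : e ∈ paths) : lookupPaths paths e.1 e.2.1 = some e.2.2 := by
  induction paths with
  | nil => cases he
  | cons hd tl ih =>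
      obtain ⟨k1, k2, v⟩ := hd
      rcases List.mem_cons.mp he with rfl | htl
      · simp [lookupPaths]
      · simp only [List.map_cons, List.nodup_cons] at hnd
        have hne : ¬ (k1 = e.1 ∧ k2 = e.2.1) := by
          rintro ⟨rfl, rfl⟩
          exact hnd.1 (List.mem_map.mpr ⟨e, htl, rfl⟩)
        rw [lookupPaths, if_neg hne]
        exact ih hnd.2 htl

-- Pre_ implies the executable nonemptiness condition the fold lemma needs
lemma pre_lookup_ne (paths : List (String × String × List String))
    (hnd : (paths.map (fun e => (e.1, e.2.1))).Nodup)
    (pr : String × String) (e : String × String × List String)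
    (he : e ∈ paths) (hk : (e.1, e.2.1) = pr) (hne : e.2.2 ≠ []) :
    (lookupPaths paths pr.1 pr.2).getD [] ≠ [] := by
  have := lookup_of_mem_nodup paths hnd e he
  obtain ⟨h1, h2⟩ := Prod.mk.inj hk
  rw [← h1, ← h2, this]
  simpa using hne

-- A's fold over chars equals foldl stepT over the collected (take 2) lists, under Pre_
lemma a_fold_eq (paths : List (String × String × List String)) :
    ∀ (cs : List Char) (prev : String) (nl : List String),
    (∀ pr ∈ List.zip (prev :: cs.map (fun c => String.ofList [c])) (cs.map (fun c => String.ofList [c])),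
        (lookupPaths paths pr.1 pr.2).getD [] ≠ []) →
    (cs.foldl
      (fun (st : List String × String) (c : Char) =>
        let p := String.ofList [c]
        let opts := (lookupPaths paths st.2 p).getD []
        let o0 := (PySem.List.pyGet? opts 0).getD ""
        if opts.length = 1 then
          (st.1.map (fun v => v ++ o0), p)
        else
          let o1 := (PySem.List.pyGet? opts 1).getD ""
          (st.1.map (fun v => v ++ o0) ++ st.1.map (fun v => v ++ o1), p))
      (nl, prev)).1
    = (collectOpts paths prev cs).foldl stepT nl := by
  intro cs
  induction cs with
  | nil => intro prev nl _; simp [collectOpts]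
  | cons c cs ih =>
      intro prev nl hpre
      have hhead : (lookupPaths paths prev (String.ofList [c])).getD [] ≠ [] := by
        exact hpre (prev, String.ofList [c]) (by simp [List.zip])
      have htail : ∀ pr ∈ List.zip (String.ofList [c] :: cs.map (fun c => String.ofList [c]))
                                   (cs.map (fun c => String.ofList [c])),
          (lookupPaths paths pr.1 pr.2).getD [] ≠ [] := by
        intro pr hm
        exact hpre pr (by simp [List.zip] at hm ⊢; tauto)
      rw [List.foldl_cons]
      simp only []
      rw [collectOpts, List.foldl_cons]
      -- one A-step rewrites to stepT, then apply the IH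
      have := a_step_eq nl ((lookupPaths paths prev (String.ofList [c])).getD []) hhead
      split_ifs at this ⊢ with hlen
      · rw [ih (String.ofList [c]) _ htail, this]
      · rw [ih (String.ofList [c]) _ htail, this]

-- ===== VERDICT (by name: the statement is the Claim_ definition above) =====
theorem next_layer_spec : Claim_equal_next_layer := by
  intro path paths _ hpre
  obtain ⟨hnd, hpre⟩ := hpre
  unfold Spec_next_layer next_layer
  have hexec : ∀ pr ∈ List.zip ("A" :: path.toList.map (fun c => String.ofList [c]))
                               (path.toList.map (fun c => String.ofList [c])),
      (lookupPaths paths pr.1 pr.2).getD [] ≠ [] := by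
    intro pr hm
    obtain ⟨e, he, hk, hne⟩ := hpre pr hm
    exact pre_lookup_ne paths hnd pr e he hk hne
  rw [a_fold_eq paths path.toList "A" [""] hexec, alt_eq_prodB, foldl_stepT]
  simp
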